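-- pv_equiv track=rewrite | github.com/jimmynguyen/daily-programmer | python/challenge319easy.py | challenge319easy
-- ===== SOURCE A (Python) =====
-- def challenge319easy(sentence):
-- 	words = sentence.split(' ')
-- 	output_words = []
-- 	for i in range(len(words)-1):
-- 		is_found = True
-- 		substr = ''
-- 		letter_index = 0
-- 		while is_found and letter_index < len(words[i+1]):
-- 			substr += words[i+1][letter_index]
-- 			if substr in words[i]:
-- 				letter_index += 1
-- 			else:
-- 				is_found = False
-- 		if letter_index > 0 and words[i][-letter_index:] == words[i+1][:letter_index]:
-- 			words[i+1] = words[i] + words[i+1][letter_index:]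
-- 		else:
-- 			output_words.append(words[i])
-- 	output_words.append(words[len(words)-1])
-- 	output_sentence = ' '.join(output_words)
-- 	return output_sentence
-- ===== SOURCE B (Python) =====
-- def challenge319easy(sentence):
-- 	words = sentence.split(' ')
--
-- 	def overlap(current, w):
-- 		# largest L with w[:L] a substring of current, by binary search:
-- 		# "w[:L] in current" is downward closed in L, so the predicate is monotone.
-- 		lo, hi = 0, len(w)
-- 		while lo < hi:
-- 			mid = (lo + hi + 1) // 2
-- 			if w[:mid] in current:
-- 				lo = mid
-- 			else:
-- 				hi = mid - 1
-- 		return lo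
--
-- 	def merge(current, rest):
-- 		if not rest:
-- 			return [current]
-- 		w = rest[0]
-- 		L = overlap(current, w)
-- 		if L > 0 and current.endswith(w[:L]):
-- 			return merge(current + w[L:], rest[1:])
-- 		return [current] + merge(w, rest[1:])
--
-- 	return ' '.join(merge(words[0], words[1:]))
-- ===== Notes on version B (the rewrite author's own statement) =====
-- stated objective: alternative
-- what changed: B computes each overlap length by binary search on L (correct because 'w[:L] in current' is downward closed in L) and builds the output with a recursive merge over the remaining words, instead of A's in-place mutation of the words list with a character-by-character substring-growing while loop.
import Mathlib
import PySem

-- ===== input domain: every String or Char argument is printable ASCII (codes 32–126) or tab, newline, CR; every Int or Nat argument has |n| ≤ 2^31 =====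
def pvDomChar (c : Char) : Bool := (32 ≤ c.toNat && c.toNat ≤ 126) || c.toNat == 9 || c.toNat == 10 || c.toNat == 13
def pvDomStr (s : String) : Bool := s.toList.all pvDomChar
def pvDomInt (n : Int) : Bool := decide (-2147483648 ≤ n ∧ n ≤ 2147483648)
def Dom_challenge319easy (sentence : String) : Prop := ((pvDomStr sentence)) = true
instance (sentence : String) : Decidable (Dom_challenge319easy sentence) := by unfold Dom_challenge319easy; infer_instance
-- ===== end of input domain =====

-- B finds each overlap length by BINARY SEARCH (valid since "w[:L] in current" is downward
-- closed in L) and merges with a recursive helper instead of A's in-place list mutation and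
-- character-by-character substring growth; objective: alternative algorithm, same cost class.

-- ===== PORT A =====
-- inner while loop: grow substr by one char of `next` while it is a substring of `cur`;
-- returns letter_index
def chAInner (cur next : List Char) (substr : List Char) (li : Nat) : Nat :=
  if h : li < next.length then
    let substr' := substr ++ [next[li]]
    if PySem.Chars.isIn substr' cur then chAInner cur next substr' (li + 1) else li
  else li
termination_by next.length - li

-- for-loop over adjacent pairs; merging writes into the next word (A mutates words[i+1])
def chALoop : List (List Char) → List (List Char) → List (List Char)
  | [], output => output
  | [last], output => output ++ [last]
  | cur :: next :: rest, output =>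
    let li := chAInner cur next [] 0
    if 0 < li ∧ PySem.List.slice cur (some (-(li : Int))) none
              = PySem.List.slice next none (some (li : Int)) then
      chALoop ((cur ++ PySem.List.slice next (some (li : Int)) none) :: rest) output
    else
      chALoop (next :: rest) (output ++ [cur])
termination_by ws _ => ws.length

def challenge319easy (sentence : String) : String :=
  let words := PySem.Chars.splitOn sentence.toList [' ']
  String.ofList (PySem.Chars.join [' '] (chALoop words []))

-- ===== PORT B =====
-- binary search: largest L ∈ [lo,hi] with w[:L] a substring of cur
-- ("w[:L] in cur" is downward closed in L, so the predicate is monotone)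
def chBsearch (cur w : List Char) (lo hi : Nat) : Nat :=
  if h : lo < hi then
    let mid := (lo + hi + 1) / 2
    if PySem.Chars.isIn (w.take mid) cur then chBsearch cur w mid hi
    else chBsearch cur w lo (mid - 1)
  else lo
termination_by hi - lo
decreasing_by all_goals omega

-- recursive merge over the remaining words
def chBmerge : List Char → List (List Char) → List (List Char)
  | cur, [] => [cur]
  | cur, w :: rest =>
    let L := chBsearch cur w 0 w.length
    if 0 < L ∧ PySem.Chars.endswith cur (w.take L) then chBmerge (cur ++ w.drop L) rest
    else cur :: chBmerge w rest

def challenge319easy_alt (sentence : String) : String :=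
  match PySem.Chars.splitOn sentence.toList [' '] with
  | [] => ""
  | w0 :: rest => String.ofList (PySem.Chars.join [' '] (chBmerge w0 rest))

-- ===== PRECONDITION & SPEC =====
def Spec_challenge319easy (sentence : String) (out : String) : Prop := out = challenge319easy_alt sentence
instance (sentence : String) (out : String) : Decidable (Spec_challenge319easy sentence out) := by unfold Spec_challenge319easy; infer_instance

-- ===== CLAIM (what is proved, stated in full; the proofs are below) =====
def Claim_equal_challenge319easy : Prop := ∀ (sentence : String), Dom_challenge319easy sentence → Spec_challenge319easy sentence (challenge319easy sentence)

-- ===== LEMMAS AND PROOFS =====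

-- `w[:l] in cur` is downward closed in l
lemma isIn_take_mono {cur w : List Char} {l l' : Nat} (hle : l' ≤ l)
    (h : PySem.Chars.isIn (w.take l) cur = true) :
    PySem.Chars.isIn (w.take l') cur = true := by
  rw [PySem.Chars.isIn_iff_infix] at h ⊢
  have heq : w.take l' = (w.take l).take l' := by
    rw [List.take_take, Nat.min_eq_left hle]
  have hpre : w.take l' <+: w.take l := heq ▸ List.take_prefix _ _
  exact hpre.isInfix.trans h

-- characterisation of a maximal overlap length
def OvSpec (cur w : List Char) (r : Nat) : Prop :=
  r ≤ w.length ∧ PySem.Chars.isIn (w.take r) cur = true ∧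
    (r = w.length ∨ PySem.Chars.isIn (w.take (r + 1)) cur = false)

lemma ovSpec_unique {cur w : List Char} {r₁ r₂ : Nat}
    (h₁ : OvSpec cur w r₁) (h₂ : OvSpec cur w r₂) : r₁ = r₂ := by
  obtain ⟨hl₁, hp₁, ht₁⟩ := h₁
  obtain ⟨hl₂, hp₂, ht₂⟩ := h₂
  by_contra hne
  rcases Nat.lt_or_ge r₁ r₂ with h | h
  · rcases ht₁ with he | hf
    · omega
    · have := isIn_take_mono (l := r₂) (l' := r₁ + 1) (by omega) hp₂
      simp [hf] at this
  · rcases Nat.lt_or_ge r₂ r₁ with h' | h'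
    · rcases ht₂ with he | hf
      · omega
      · have := isIn_take_mono (l := r₁) (l' := r₂ + 1) (by omega) hp₁
        simp [hf] at this
    · omega

lemma chAInner_spec (cur w : List Char) :
    ∀ n li, n = w.length - li → PySem.Chars.isIn (w.take li) cur = true → li ≤ w.length →
      OvSpec cur w (chAInner cur w (w.take li) li) := by
  intro n
  induction' n using Nat.strong_induction_on with n ih
  intro li hn hin hle
  rw [chAInner]
  by_cases h : li < w.length
  · rw [dif_pos h]
    have htake : w.take li ++ [w[li]] = w.take (li + 1) := by
      rw [List.take_add_one, List.getElem?_eq_getElem h]; rfl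
    rw [htake]
    by_cases h2 : PySem.Chars.isIn (w.take (li + 1)) cur = true
    · rw [if_pos h2]
      exact ih (w.length - (li + 1)) (by omega) (li + 1) rfl h2 (by omega)
    · rw [if_neg h2]
      exact ⟨Nat.le_of_lt h, hin, Or.inr (by simpa using h2)⟩
  · rw [dif_neg h]
    exact ⟨hle, hin, Or.inl (by omega)⟩

lemma chBsearch_spec (cur w : List Char) :
    ∀ n lo hi, n = hi - lo → lo ≤ hi → hi ≤ w.length →
      PySem.Chars.isIn (w.take lo) cur = true →
      (hi = w.length ∨ PySem.Chars.isIn (w.take (hi + 1)) cur = false) →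
      OvSpec cur w (chBsearch cur w lo hi) := by
  intro n
  induction' n using Nat.strong_induction_on with n ih
  intro lo hi hn hle hwl hin hhi
  rw [chBsearch]
  by_cases h : lo < hi
  · rw [dif_pos h]
    by_cases h2 : PySem.Chars.isIn (w.take ((lo + hi + 1) / 2)) cur = true
    · rw [if_pos h2]
      exact ih (hi - (lo + hi + 1) / 2) (by omega) _ _ rfl (by omega) hwl h2 hhi
    · rw [if_neg h2]
      refine ih ((lo + hi + 1) / 2 - 1 - lo) (by omega) _ _ rfl (by omega) (by omega) hin ?_
      right
      have : (lo + hi + 1) / 2 - 1 + 1 = (lo + hi + 1) / 2 := by omega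
      rw [this]
      simpa using h2
  · rw [dif_neg h]
    have : lo = hi := by omega
    subst this
    exact ⟨hwl, hin, hhi⟩

-- the two overlap computations agree (both satisfy the unique maximal-overlap spec)
lemma ov_eq (cur w : List Char) : chAInner cur w [] 0 = chBsearch cur w 0 w.length := by
  have hA := chAInner_spec cur w w.length 0 (by omega)
    (by simpa using PySem.Chars.isIn_nil cur) (Nat.zero_le _)
  have hB := chBsearch_spec cur w w.length 0 w.length (by omega) (Nat.zero_le _)
    (le_refl _) (by simpa using PySem.Chars.isIn_nil cur) (Or.inl rfl)
  exact ovSpec_unique (by simpa using hA) hB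

-- the branch conditions of the two ports agree
lemma cond_eq (cur w : List Char) {N : Nat} (hN : OvSpec cur w N) (h0 : 0 < N) :
    (PySem.List.slice cur (some (-(N : Int))) none = PySem.List.slice w none (some (N : Int)))
      ↔ PySem.Chars.endswith cur (w.take N) = true := by
  have hNle : N ≤ w.length := hN.1
  have hinf : w.take N <:+: cur := (PySem.Chars.isIn_iff_infix _ _).mp hN.2.1
  have hlen : (w.take N).length = N := by simp [Nat.min_eq_left hNle]
  have hNc : N ≤ cur.length := hlen ▸ hinf.length_le
  rw [PySem.List.slice_from_neg_natCast cur N h0, PySem.List.slice_to_natCast,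
    PySem.Chars.endswith_iff]
  constructor
  · intro h
    rw [← h]
    exact List.drop_suffix _ _
  · intro h
    obtain ⟨t, ht⟩ := h
    rw [← ht]
    have hl2 : (t ++ w.take N).length - N = t.length := by simp [hlen]
    rw [hl2, List.drop_left]

-- the main loop of A equals the recursive merge of B
lemma loop_eq : ∀ (ws : List (List Char)) (cur : List Char) (out : List (List Char)),
    chALoop (cur :: ws) out = out ++ chBmerge cur ws := by
  intro ws
  induction ws with
  | nil => intro cur out; simp [chALoop, chBmerge]
  | cons w ws ih =>
    intro cur out
    have hNB : chAInner cur w [] 0 = chBsearch cur w 0 w.length := ov_eq cur w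
    have hspec : OvSpec cur w (chAInner cur w [] 0) := by
      rw [hNB]
      exact chBsearch_spec cur w w.length 0 w.length (by omega) (Nat.zero_le _)
        (le_refl _) (by simpa using PySem.Chars.isIn_nil cur) (Or.inl rfl)
    simp only [chALoop, chBmerge, ← hNB]
    by_cases h0 : 0 < chAInner cur w [] 0
    · rcases hc : PySem.Chars.endswith cur (w.take (chAInner cur w [] 0)) with _ | _
      · rw [if_neg, if_neg, ih]
        · simp
        · exact fun hh => by simp [hc] at hh
        · exact fun hh => by
            have := (cond_eq cur w hspec h0).mp hh.2
            simp [hc] at this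
      · rw [if_pos ⟨h0, (cond_eq cur w hspec h0).mpr hc⟩, if_pos ⟨h0, rfl⟩,
          PySem.List.slice_from_natCast, ih]
    · rw [if_neg (fun hh => h0 hh.1), if_neg (fun hh => h0 hh.1), ih]
      simp

-- ===== VERDICT (by name: the statement is the Claim_ definition above) =====
theorem challenge319easy_spec : Claim_equal_challenge319easy := by
  intro s _
  unfold Spec_challenge319easy challenge319easy challenge319easy_alt
  cases h : PySem.Chars.splitOn s.toList [' '] with
  | nil => simp [chALoop, PySem.Chars.join, List.intercalate]
  | cons w0 rest => simp only [loop_eq, List.nil_append]
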